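-- pv_equiv track=rewrite | github.com/zointblackbriar/QuestionAnswering | SemanticParse/ContituentParseTree/matcher.py | cross_context
-- ===== SOURCE A (Python) =====
-- def cross_context(context):
--     """Cross product of all contexts"""
--
--     if not context:
--         return[]
--
--     product = [{}]
--
--     for contexts in context:
--         temp_product  = []
--         for item in contexts:
--             for iteminnerloop in product:
--                 copyItem = item.copy()
--                 copyItem.update(iteminnerloop)
--                 temp_product.append(copyItem)
--         product = temp_product
--     return product
-- ===== SOURCE B (Python) =====
-- import itertools
--
-- def cross_context(context):
--     """Cross product of all contexts"""
--     if not context: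
--         return []
--     result = []
--     for combo in itertools.product(*reversed(context)):
--         merged = {}
--         for d in combo:
--             merged.update(d)
--         result.append(merged)
--     return result
-- ===== Notes on version B (the rewrite author's own statement) =====
-- stated objective: idiomatic
-- what changed: Replaces A's repeated rebuild of the whole partial-product list (copying and re-merging every accumulated dict at each stage) with a single itertools.product enumeration over reversed(context), merging each full combination once into a fresh dict.
import Mathlib
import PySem

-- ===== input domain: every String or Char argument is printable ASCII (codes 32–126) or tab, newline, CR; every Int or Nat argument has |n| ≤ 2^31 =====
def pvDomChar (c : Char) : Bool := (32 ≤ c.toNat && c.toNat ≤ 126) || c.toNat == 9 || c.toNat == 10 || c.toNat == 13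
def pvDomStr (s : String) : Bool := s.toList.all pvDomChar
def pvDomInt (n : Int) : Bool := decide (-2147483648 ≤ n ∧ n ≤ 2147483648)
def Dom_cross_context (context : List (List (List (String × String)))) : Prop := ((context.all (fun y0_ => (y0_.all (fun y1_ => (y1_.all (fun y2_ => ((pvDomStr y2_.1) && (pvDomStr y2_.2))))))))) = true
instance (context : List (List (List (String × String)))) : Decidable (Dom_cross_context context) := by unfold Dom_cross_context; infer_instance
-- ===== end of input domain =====

-- B replaces A's per-stage rebuild of the whole partial-product list by a single
-- itertools.product enumeration over reversed(context), merging each full combination once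
-- (objective: idiomatic; same asymptotic cost).

-- ===== PORT A =====
-- A's dicts are PySem.Dict; each literal `item` dict is Dict.ofList of its pairs,
-- `copyItem.update(...)` is Dict.update, and the returned dicts are rendered as items lists.
def cross_context (context : List (List (List (String × String)))) : List (List (String × String)) :=
  if context = [] then []
  else
    ((context.foldl
        (fun product contexts =>
          contexts.foldl
            (fun temp_product item =>
              product.foldl
                (fun temp_product iteminnerloop =>
                  temp_product ++ [(PySem.Dict.ofList item).update iteminnerloop.items])
                temp_product)
            [])
        [(PySem.Dict.empty : PySem.Dict String String)])).map
      (fun d => d.items)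

-- ===== PORT B =====
-- itertools.product(l₁, …, lₙ): leftmost factor varies slowest.
def pvProdTuples {α : Type} : List (List α) → List (List α)
  | [] => [[]]
  | l :: ls => l.flatMap (fun x => (pvProdTuples ls).map (fun t => x :: t))

def cross_context_alt (context : List (List (List (String × String)))) : List (List (String × String)) :=
  if context = [] then []
  else
    (pvProdTuples context.reverse).map
      (fun combo =>
        (combo.foldl (fun merged d => merged.update d)
          (PySem.Dict.empty : PySem.Dict String String)).items)

-- ===== PRECONDITION & SPEC =====
def Spec_cross_context (context : List (List (List (String × String)))) (out : List (List (String × String))) : Prop := out = cross_context_alt context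
instance (context : List (List (List (String × String)))) (out : List (List (String × String))) : Decidable (Spec_cross_context context out) := by unfold Spec_cross_context; infer_instance

-- ===== CLAIM (what is proved, stated in full; the proofs are below) =====
def Claim_equal_cross_context : Prop := ∀ (context : List (List (List (String × String)))), Dom_cross_context context → Spec_cross_context context (cross_context context)

-- ===== LEMMAS AND PROOFS =====

-- Two dicts whose items agree position by position except possibly in the value stored at key k.
def pvEqExcept (k : String) (a b : PySem.Dict String String) : Prop :=
  List.Forall₂ (fun p q : String × String => p.1 = q.1 ∧ (p.1 ≠ k → p.2 = q.2)) a.items b.items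

-- Every occurrence of key k in a's items carries value v.
def pvAllKV (k v : String) (a : PySem.Dict String String) : Prop :=
  ∀ p ∈ a.items, p.1 = k → p.2 = v

theorem pvEqExcept_refl (k : String) (a : PySem.Dict String String) : pvEqExcept k a a := by
  unfold pvEqExcept
  exact List.forall₂_same.mpr (fun p _ => ⟨rfl, fun _ => rfl⟩)

theorem pvForall₂_fst {R : String × String → String × String → Prop}
    (hR : ∀ p q, R p q → p.1 = q.1) {l₁ l₂ : List (String × String)}
    (h : List.Forall₂ R l₁ l₂) : l₁.map Prod.fst = l₂.map Prod.fst := by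
  induction h with
  | nil => rfl
  | cons hpq _ ih => simp [hR _ _ hpq, ih]

theorem pvForall₂_append {α : Type} {R : α → α → Prop} {l₁ l₂ m₁ m₂ : List α}
    (h : List.Forall₂ R l₁ l₂) (h₂ : List.Forall₂ R m₁ m₂) :
    List.Forall₂ R (l₁ ++ m₁) (l₂ ++ m₂) := by
  induction h with
  | nil => exact h₂
  | cons hab _ ih => exact List.Forall₂.cons hab ih

theorem pvEqExcept_keys {k : String} {a b : PySem.Dict String String}
    (h : pvEqExcept k a b) : a.items.map Prod.fst = b.items.map Prod.fst :=
  pvForall₂_fst (fun _ _ hpq => hpq.1) h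

theorem pvEqExcept_contains {k : String} {a b : PySem.Dict String String}
    (h : pvEqExcept k a b) (j : String) : a.contains j = b.contains j := by
  have hk := pvEqExcept_keys h
  simp only [PySem.Dict.contains]
  have : ∀ (l : List (String × String)), (l.any fun p => p.1 == j) = (l.map Prod.fst).any (· == j) := by
    intro l; simp only [List.any_map]; rfl
  rw [this, this, hk]

theorem pvForall₂_map {α β : Type} {R : α → α → Prop} {l₁ l₂ : List α}
    (h : List.Forall₂ R l₁ l₂) (f g : α → β) {S : β → β → Prop}
    (hfg : ∀ p q, R p q → S (f p) (g q)) : List.Forall₂ S (l₁.map f) (l₂.map g) := by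
  induction h with
  | nil => exact List.Forall₂.nil
  | cons hpq _ ih => exact List.Forall₂.cons (hfg _ _ hpq) ih

theorem pvEqExcept_insert {k : String} {a b : PySem.Dict String String}
    (h : pvEqExcept k a b) (j u u' : String) (huu : j ≠ k → u = u') :
    pvEqExcept k (a.insert j u) (b.insert j u') := by
  unfold pvEqExcept
  rw [PySem.Dict.items_insert, PySem.Dict.items_insert, ← pvEqExcept_contains h j]
  by_cases hc : a.contains j = true
  · rw [if_pos hc, if_pos hc]
    exact pvForall₂_map h _ _ (by
      intro p q hpq
      by_cases hpj : p.1 = j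
      · have hqj : q.1 = j := by rw [← hpq.1]; exact hpj
        rw [if_pos (by simp [hpj]), if_pos (by simp [hqj])]
        exact ⟨rfl, fun hk => huu hk⟩
      · have hqj : ¬ q.1 = j := by rw [← hpq.1]; exact hpj
        rw [if_neg (by simp [hpj]), if_neg (by simp [hqj])]
        exact hpq)
  · rw [if_neg hc, if_neg hc]
    exact pvForall₂_append h (List.Forall₂.cons ⟨rfl, fun hk => huu hk⟩ List.Forall₂.nil)

theorem pvListRepl {k v : String} {l₁ l₂ : List (String × String)}
    (h : List.Forall₂ (fun p q : String × String => p.1 = q.1 ∧ (p.1 ≠ k → p.2 = q.2)) l₁ l₂)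
    (hall : ∀ p ∈ l₁, p.1 = k → p.2 = v) :
    l₁ = l₂.map (fun q => if q.1 == k then (k, v) else q) := by
  induction h with
  | nil => rfl
  | @cons p q t₁ t₂ hpq _ ih =>
      have ht : t₁ = t₂.map (fun q => if q.1 == k then (k, v) else q) :=
        ih (fun p hp => hall p (List.mem_cons_of_mem _ hp))
      by_cases hpk : p.1 = k
      · have hqk : q.1 = k := by rw [← hpq.1]; exact hpk
        have hv : p.2 = v := hall p List.mem_cons_self hpk
        rw [List.map_cons, if_pos (by simp [hqk]), ← ht]
        congr 1
        exact Prod.ext hpk hv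
      · have hqk : ¬ q.1 = k := by rw [← hpq.1]; exact hpk
        rw [List.map_cons, if_neg (by simp [hqk]), ← ht,
          (Prod.ext hpq.1 (hpq.2 hpk) : p = q)]

theorem pvEqExcept_insert_k_eq {k v : String} {a b : PySem.Dict String String}
    (h : pvEqExcept k a b) (hall : pvAllKV k v a) (hc : a.contains k = true) :
    a = b.insert k v := by
  apply PySem.Dict.ext
  rw [PySem.Dict.items_insert, ← pvEqExcept_contains h k, hc, if_pos rfl]
  exact pvListRepl h hall

theorem pvAllKV_insert_self (k v : String) (a : PySem.Dict String String) :
    pvAllKV k v (a.insert k v) := by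
  intro p hp hpk
  rw [PySem.Dict.items_insert] at hp
  by_cases hc : a.contains k = true
  · rw [if_pos hc] at hp
    obtain ⟨q, hq, hqe⟩ := List.mem_map.mp hp
    by_cases hqk : (q.1 == k) = true
    · rw [if_pos hqk] at hqe; rw [← hqe]
    · rw [if_neg hqk] at hqe
      subst hqe
      exact absurd (beq_iff_eq.mpr hpk) hqk
  · rw [if_neg hc] at hp
    rcases List.mem_append.mp hp with hp | hp
    · exact absurd (show a.contains k = true from
        List.any_eq_true.mpr ⟨p, hp, beq_iff_eq.mpr hpk⟩) hc
    · simp only [List.mem_singleton] at hp; rw [hp]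

theorem pvAllKV_insert_ne {k v : String} (j u : String) (hjk : j ≠ k)
    {a : PySem.Dict String String} (hall : pvAllKV k v a) :
    pvAllKV k v (a.insert j u) := by
  intro p hp hpk
  rw [PySem.Dict.items_insert] at hp
  by_cases hc : a.contains j = true
  · rw [if_pos hc] at hp
    obtain ⟨q, hq, hqe⟩ := List.mem_map.mp hp
    by_cases hqj : (q.1 == j) = true
    · rw [if_pos hqj] at hqe
      rw [← hqe] at hpk
      exact absurd hpk hjk
    · rw [if_neg hqj] at hqe
      subst hqe
      exact hall q hq hpk
  · rw [if_neg hc] at hp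
    rcases List.mem_append.mp hp with hp | hp
    · exact hall p hp hpk
    · simp only [List.mem_singleton] at hp
      rw [hp] at hpk
      exact absurd hpk hjk

theorem pvUpdateReplace (t : List (String × String)) (a₁ a₂ : PySem.Dict String String)
    (k v : String) (h : pvEqExcept k a₁ a₂) (hall : pvAllKV k v a₁) (hc : a₁.contains k = true) :
    a₁.update (t.map (fun p => if p.1 == k then (k, v) else p)) = (a₂.update t).insert k v := by
  induction t generalizing a₁ a₂ with
  | nil => exact pvEqExcept_insert_k_eq h hall hc
  | cons p t ih =>
      by_cases hpk : p.1 = k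
      · rw [List.map_cons, if_pos (by simp [hpk])]
        show (a₁.insert k v).update (t.map _) = ((a₂.insert p.1 p.2).update t).insert k v
        rw [hpk]
        exact ih (a₁.insert k v) (a₂.insert k p.2)
          (pvEqExcept_insert h k v p.2 (fun hkk => absurd rfl hkk))
          (pvAllKV_insert_self k v a₁)
          (by rw [PySem.Dict.contains_insert]; simp)
      · rw [List.map_cons, if_neg (by simp [hpk])]
        show (a₁.insert p.1 p.2).update (t.map _) = ((a₂.insert p.1 p.2).update t).insert k v
        exact ih (a₁.insert p.1 p.2) (a₂.insert p.1 p.2)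
          (pvEqExcept_insert h p.1 p.2 p.2 (fun _ => rfl))
          (pvAllKV_insert_ne p.1 p.2 hpk hall)
          (by rw [PySem.Dict.contains_insert, hc]; simp)

theorem pvUpdateReplaceMem (l : List (String × String)) (a : PySem.Dict String String)
    (k v : String) (hk : k ∈ l.map Prod.fst) :
    a.update (l.map (fun p => if p.1 == k then (k, v) else p)) = (a.update l).insert k v := by
  induction l generalizing a with
  | nil => simp at hk
  | cons p t ih =>
      by_cases hpk : p.1 = k
      · rw [List.map_cons, if_pos (by simp [hpk])]
        show (a.insert k v).update (t.map _) = ((a.insert p.1 p.2).update t).insert k v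
        rw [hpk]
        exact pvUpdateReplace t (a.insert k v) (a.insert k p.2) k v
          (pvEqExcept_insert (pvEqExcept_refl k a) k v p.2 (fun hkk => absurd rfl hkk))
          (pvAllKV_insert_self k v a)
          (by rw [PySem.Dict.contains_insert]; simp)
      · have hkt : k ∈ t.map Prod.fst := by
          rcases List.mem_map.mp hk with ⟨q, hq, hqe⟩
          rcases List.mem_cons.mp hq with hq | hq
          · exact absurd (hq ▸ hqe) hpk
          · exact List.mem_map.mpr ⟨q, hq, hqe⟩
        rw [List.map_cons, if_neg (by simp [hpk])]
        show (a.insert p.1 p.2).update (t.map _) = ((a.insert p.1 p.2).update t).insert k v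
        exact ih (a.insert p.1 p.2) hkt

theorem pvUpdateInsert (a b : PySem.Dict String String) (k v : String) :
    a.update (b.insert k v).items = (a.update b.items).insert k v := by
  by_cases hc : b.contains k = true
  · rw [PySem.Dict.items_insert, if_pos hc]
    apply pvUpdateReplaceMem
    have hc' : (b.items.any fun p => p.1 == k) = true := hc
    rcases List.any_eq_true.mp hc' with ⟨p, hp, hpe⟩
    exact List.mem_map.mpr ⟨p, hp, beq_iff_eq.mp hpe⟩
  · rw [PySem.Dict.items_insert, if_neg hc]
    simp [PySem.Dict.update, List.foldl_append]

theorem pvUpdateUpdate (x : List (String × String)) (a b : PySem.Dict String String) :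
    a.update ((b.update x).items) = (a.update b.items).update x := by
  induction x generalizing b with
  | nil => rfl
  | cons p t ih =>
      show a.update (((b.insert p.1 p.2).update t).items) = _
      rw [ih (b.insert p.1 p.2), pvUpdateInsert]
      rfl

theorem pvUpdateItemsSelf (d : PySem.Dict String String) (hnd : d.keys.Nodup) :
    PySem.Dict.empty.update d.items = d := by
  apply PySem.Dict.ext
  have := PySem.Dict.items_foldl_insert_fresh (l := d.items) (k := Prod.fst) (v := Prod.snd)
      (d := (PySem.Dict.empty : PySem.Dict String String))
      (by intro a _; simp [PySem.Dict.contains, PySem.Dict.empty])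
      (by simpa [PySem.Dict.keys] using hnd)
  simpa [PySem.Dict.update, PySem.Dict.empty] using this

theorem pvProdTuples_append {α : Type} (ls : List (List α)) (c : List α) :
    pvProdTuples (ls ++ [c]) = (pvProdTuples ls).flatMap (fun t => c.map (fun x => t ++ [x])) := by
  induction ls with
  | nil => simp [pvProdTuples, ← List.map_eq_flatMap]
  | cons l ls ih =>
      simp only [List.cons_append, pvProdTuples, ih]
      simp [List.flatMap_assoc, List.flatMap_map, List.map_flatMap, List.map_map, Function.comp_def]

theorem pvStep_eq (product : List (PySem.Dict String String))
    (c : List (List (String × String))) :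
    (c.foldl
      (fun temp_product item =>
        product.foldl
          (fun temp_product iteminnerloop =>
            temp_product ++ [(PySem.Dict.ofList item).update iteminnerloop.items])
          temp_product)
      [])
    = c.flatMap (fun item => product.map (fun p => (PySem.Dict.ofList item).update p.items)) := by
  simp only [PySem.List.foldl_append_singleton_eq_map]
  rw [PySem.List.foldl_append_eq_flatMap (fun item => product.map fun p => (PySem.Dict.ofList item).update p.items) c []]
  simp

theorem pvLoop (cs : List (List (List (String × String))))
    (product : List (PySem.Dict String String))
    (hnd : ∀ p ∈ product, p.keys.Nodup) :
    cs.foldl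
      (fun product contexts =>
        contexts.foldl
          (fun temp_product item =>
            product.foldl
              (fun temp_product iteminnerloop =>
                temp_product ++ [(PySem.Dict.ofList item).update iteminnerloop.items])
              temp_product)
          [])
      product
    = (pvProdTuples cs.reverse).flatMap (fun combo =>
        product.map (fun p =>
          (combo.foldl (fun merged d => merged.update d) PySem.Dict.empty).update p.items)) := by
  induction cs generalizing product with
  | nil =>
      simp only [List.reverse_nil, pvProdTuples, List.flatMap_cons, List.flatMap_nil,
        List.append_nil, List.foldl_nil]
      rw [List.map_congr_left (fun p hp => pvUpdateItemsSelf p (hnd p hp))]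
      simp
  | cons c cs ih =>
      rw [List.foldl_cons, pvStep_eq, ih _ (by
        intro q hq
        rcases List.mem_flatMap.mp hq with ⟨item, _, hq⟩
        rcases List.mem_map.mp hq with ⟨p, _, hqe⟩
        exact hqe ▸ PySem.Dict.nodup_keys_update _ _ (PySem.Dict.nodup_keys_ofList _))]
      rw [List.reverse_cons, pvProdTuples_append]
      simp only [List.map_flatMap, List.flatMap_map, List.map_map, List.flatMap_assoc,
        List.foldl_append, List.foldl_cons, List.foldl_nil]
      congr 1
      funext t
      congr 1
      funext item
      congr 1
      funext p
      show (t.foldl (fun merged d => merged.update d) PySem.Dict.empty).update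
          ((PySem.Dict.ofList item).update p.items).items = _
      rw [pvUpdateUpdate]
      show ((t.foldl (fun merged d => merged.update d) PySem.Dict.empty).update
          ((PySem.Dict.empty.update item).items)).update p.items = _
      rw [pvUpdateUpdate]
      rfl

-- ===== VERDICT (by name: the statement is the Claim_ definition above) =====
theorem cross_context_spec : Claim_equal_cross_context := by
  intro context _
  unfold Spec_cross_context cross_context cross_context_alt
  by_cases hc : context = []
  · simp [hc]
  · rw [if_neg hc, if_neg hc]
    rw [pvLoop context [PySem.Dict.empty] (by
      intro p hp
      simp only [List.mem_singleton] at hp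
      simp [hp, PySem.Dict.keys, PySem.Dict.empty])]
    simp [PySem.Dict.empty, PySem.Dict.update, ← List.map_eq_flatMap]
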